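-- pv_equiv track=rewrite | github.com/loopedfrog4/Everything | 1008/Tutorial_2/mergeTwoArray.py | mergeListHelper
-- ===== SOURCE A (Python) =====
-- def mergeListHelper(list1, list2):
--     array3 = []
--     for index in range(0, len(list1)):
--         if index >= len(list2):
--             array3.append(list1[index])
--         else:
--             if list1[index] > list2[index]:
--                 array3.append(list2[index])
--                 array3.append(list1[index])
--             else:
--                 array3.append(list1[index])
--                 array3.append(list2[index])
--     return array3
-- ===== SOURCE B (Python) =====
-- def mergeListHelper(list1, list2):
--     out = []
--     i = len(list1)
--     while i > len(list2):
--         i -= 1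
--         out.append(list1[i])
--     while i > 0:
--         i -= 1
--         a, b = list1[i], list2[i]
--         out.append(max(a, b))
--         out.append(min(a, b))
--     out.reverse()
--     return out
-- ===== Notes on version B (the rewrite author's own statement) =====
-- stated objective: alternative
-- what changed: Builds the result back-to-front: a downward counter first emits list1's unpaired tail in reverse, then for each pair emits max before min via arithmetic min/max instead of a comparison branch, and one final reverse restores the order; A's single forward indexed loop with a per-iteration bounds check and an if/else pair-ordering branch disappears.
import Mathlib
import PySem

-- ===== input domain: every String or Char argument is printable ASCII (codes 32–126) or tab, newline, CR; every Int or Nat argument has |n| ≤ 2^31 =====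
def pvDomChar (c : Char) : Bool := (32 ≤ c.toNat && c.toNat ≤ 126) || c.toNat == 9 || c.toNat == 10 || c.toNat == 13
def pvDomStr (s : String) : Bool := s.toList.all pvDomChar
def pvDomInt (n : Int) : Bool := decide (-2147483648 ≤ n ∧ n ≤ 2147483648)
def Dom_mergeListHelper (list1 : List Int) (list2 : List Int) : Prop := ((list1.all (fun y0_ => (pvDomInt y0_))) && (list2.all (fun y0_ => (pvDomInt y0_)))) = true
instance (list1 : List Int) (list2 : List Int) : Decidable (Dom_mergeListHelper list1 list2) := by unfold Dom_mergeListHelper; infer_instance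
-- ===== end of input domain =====

-- B builds the result back-to-front with a downward counter (tail regime, then max/min per pair) and one final reverse, replacing A's forward indexed loop with its bounds check and ordering branch (alternative; return value unchanged).


-- ===== PORT A =====
-- for index in range(0, len(list1)): indexed accesses are in range, so pyGetD is exact
def mergeListHelper (list1 : List Int) (list2 : List Int) : List Int :=
  (PySem.List.pyRange 0 (list1.length : Int) 1).foldl
    (fun array3 index =>
      if (list2.length : Int) ≤ index then
        array3 ++ [PySem.List.pyGetD list1 index 0]
      else if PySem.List.pyGetD list1 index 0 > PySem.List.pyGetD list2 index 0 then
        (array3 ++ [PySem.List.pyGetD list2 index 0]) ++ [PySem.List.pyGetD list1 index 0]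
      else
        (array3 ++ [PySem.List.pyGetD list1 index 0]) ++ [PySem.List.pyGetD list2 index 0]) []

-- ===== PORT B =====
-- first while loop: 'while i > len(list2): i -= 1; out.append(list1[i])'
-- i starts at len(list1) and only decrements while positive, so it is modelled as a Nat counter
def pvTailLoop (l1 : List Int) (m : Nat) : Nat → List Int → Nat × List Int
  | 0, out => (0, out)
  | i + 1, out =>
      if m < i + 1 then pvTailLoop l1 m i (out ++ [PySem.List.pyGetD l1 (i : Int) 0])
      else (i + 1, out)

-- second while loop: 'while i > 0: i -= 1; append max; append min'
def pvPairLoop (l1 : List Int) (l2 : List Int) : Nat → List Int → List Int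
  | 0, out => out
  | i + 1, out =>
      pvPairLoop l1 l2 i
        ((out ++ [max (PySem.List.pyGetD l1 (i : Int) 0) (PySem.List.pyGetD l2 (i : Int) 0)])
             ++ [min (PySem.List.pyGetD l1 (i : Int) 0) (PySem.List.pyGetD l2 (i : Int) 0)])

def mergeListHelper_alt (list1 : List Int) (list2 : List Int) : List Int :=
  (pvPairLoop list1 list2 (pvTailLoop list1 list2.length list1.length []).1
    (pvTailLoop list1 list2.length list1.length []).2).reverse

-- ===== PRECONDITION & SPEC =====
def Spec_mergeListHelper (list1 : List Int) (list2 : List Int) (out : List Int) : Prop := out = mergeListHelper_alt list1 list2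
instance (list1 : List Int) (list2 : List Int) (out : List Int) : Decidable (Spec_mergeListHelper list1 list2 out) := by unfold Spec_mergeListHelper; infer_instance

-- ===== CLAIM (what is proved, stated in full; the proofs are below) =====
def Claim_equal_mergeListHelper : Prop := ∀ (list1 : List Int) (list2 : List Int), Dom_mergeListHelper list1 list2 → Spec_mergeListHelper list1 list2 (mergeListHelper list1 list2)

-- ===== LEMMAS AND PROOFS =====

-- reference recursion both ports are reduced to
def pvGo : List Int → List Int → List Int
  | [], _ => []
  | x :: xs, [] => x :: pvGo xs []
  | x :: xs, y :: ys => min x y :: max x y :: pvGo xs ys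

lemma pvGo_nil (l : List Int) : pvGo l [] = l := by
  induction l with
  | nil => simp [pvGo]
  | cons x xs ih => simp [pvGo, ih]

lemma pvFoldl_range_succ_shift {β : Type} (f : β → Nat → β) (n : Nat) (acc : β) :
    (List.range (n + 1)).foldl f acc
      = (List.range n).foldl (fun a i => f a (i + 1)) (f acc 0) := by
  rw [List.range_succ_eq_map, List.foldl_cons, List.foldl_map]

lemma pvA_go (l1 l2 acc : List Int) :
    (List.range l1.length).foldl
      (fun array3 i =>
        if l2.length ≤ i then array3 ++ [l1.getD i 0]
        else if l1.getD i 0 > l2.getD i 0 then (array3 ++ [l2.getD i 0]) ++ [l1.getD i 0]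
        else (array3 ++ [l1.getD i 0]) ++ [l2.getD i 0]) acc
    = acc ++ pvGo l1 l2 := by
  induction l1 generalizing l2 acc with
  | nil => simp [pvGo]
  | cons x xs ih =>
    rw [List.length_cons, pvFoldl_range_succ_shift]
    cases l2 with
    | nil =>
      refine Eq.trans (b := (List.range xs.length).foldl
          (fun array3 i =>
            if ([] : List Int).length ≤ i then array3 ++ [xs.getD i 0]
            else if xs.getD i 0 > ([] : List Int).getD i 0 then
              (array3 ++ [([] : List Int).getD i 0]) ++ [xs.getD i 0]
            else (array3 ++ [xs.getD i 0]) ++ [([] : List Int).getD i 0])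
          (acc ++ [x])) ?_ ?_
      · congr 1
      · rw [ih []]
        simp [pvGo]
    | cons y ys =>
      refine Eq.trans (b := (List.range xs.length).foldl
          (fun array3 i =>
            if ys.length ≤ i then array3 ++ [xs.getD i 0]
            else if xs.getD i 0 > ys.getD i 0 then (array3 ++ [ys.getD i 0]) ++ [xs.getD i 0]
            else (array3 ++ [xs.getD i 0]) ++ [ys.getD i 0])
          (if x > y then (acc ++ [y]) ++ [x] else (acc ++ [x]) ++ [y])) ?_ ?_
      · congr 1
        funext a i; simp [List.getD]
      · rw [ih ys]
        by_cases h : x > y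
        · have hmin : min x y = y := min_eq_right (le_of_lt h)
          have hmax : max x y = x := max_eq_left (le_of_lt h)
          simp [pvGo, h, hmin, hmax, List.append_assoc]
        · have hle : x ≤ y := le_of_not_gt h
          simp [pvGo, h, min_eq_left hle, max_eq_right hle, List.append_assoc]

lemma pvA_eq_go (l1 l2 : List Int) : mergeListHelper l1 l2 = pvGo l1 l2 := by
  unfold mergeListHelper
  rw [PySem.List.pyRange_zero_natCast, List.foldl_map]
  refine Eq.trans ?_ (by simpa using pvA_go l1 l2 [])
  congr 1
  funext a i
  simp [PySem.List.pyGetD_natCast, Nat.cast_le]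

-- tail loop: appends l1[i-1], …, l1[m] and stops with counter min i m
lemma pvTailLoop_eq (l1 : List Int) (m : Nat) :
    ∀ (i : Nat) (out : List Int), i ≤ l1.length →
      pvTailLoop l1 m i out = (min i m, out ++ ((l1.take i).drop m).reverse) := by
  intro i
  induction i with
  | zero => intro out _; simp [pvTailLoop]
  | succ j ih =>
    intro out hle
    by_cases h : m < j + 1
    · have hj : j < l1.length := Nat.lt_of_lt_of_le (Nat.lt_succ_self j) hle
      have hmj : m ≤ j := Nat.lt_succ_iff.mp h
      have htake1 : l1.take (j + 1) = l1.take j ++ [l1[j]] := by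
        rw [List.take_add_one, List.getElem?_eq_getElem hj]; rfl
      have hlen : m ≤ (l1.take j).length := by simp [List.length_take]; omega
      have htake : (l1.take (j + 1)).drop m = (l1.take j).drop m ++ [l1[j]] := by
        rw [htake1, List.drop_append_of_le_length hlen]
      have hmin : min (j + 1) m = min j m := by omega
      rw [pvTailLoop, if_pos h, ih _ hj.le]
      simp [htake, hmin, PySem.List.pyGetD_natCast, List.getD_eq_getElem?_getD,
        List.getElem?_eq_getElem hj, List.append_assoc]
    · have : (l1.take (j + 1)).drop m = [] := by
        apply List.drop_eq_nil_of_le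
        simp; omega
      rw [pvTailLoop, if_neg h]
      simp [this]
      omega

-- pair loop: builds the first i pairs reversed in front (as a suffix of out)
def pvRev2 (l1 l2 : List Int) : Nat → List Int
  | 0 => []
  | i + 1 => max (l1.getD i 0) (l2.getD i 0) :: min (l1.getD i 0) (l2.getD i 0)
      :: pvRev2 l1 l2 i

lemma pvPairLoop_eq (l1 l2 : List Int) :
    ∀ (i : Nat) (out : List Int),
      pvPairLoop l1 l2 i out = out ++ pvRev2 l1 l2 i := by
  intro i
  induction i with
  | zero => intro out; simp [pvPairLoop, pvRev2]
  | succ j ih =>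
    intro out
    rw [pvPairLoop, ih]
    simp [pvRev2, PySem.List.pyGetD_natCast, List.append_assoc]

lemma pvRev2_reverse (l1 l2 : List Int) (k : Nat) :
    (pvRev2 l1 l2 k).reverse
      = (List.range k).flatMap (fun j => [min (l1.getD j 0) (l2.getD j 0), max (l1.getD j 0) (l2.getD j 0)]) := by
  induction k with
  | zero => simp [pvRev2]
  | succ j ih => rw [pvRev2, List.range_succ]; simp [ih]

lemma pvGo_flat (l1 l2 : List Int) :
    pvGo l1 l2
      = (List.range (min l1.length l2.length)).flatMap
          (fun j => [min (l1.getD j 0) (l2.getD j 0), max (l1.getD j 0) (l2.getD j 0)])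
        ++ l1.drop l2.length := by
  induction l1 generalizing l2 with
  | nil => simp [pvGo]
  | cons x xs ih =>
    cases l2 with
    | nil => simp [pvGo_nil]
    | cons y ys =>
      show min x y :: max x y :: pvGo xs ys = _
      rw [List.length_cons, List.length_cons, Nat.succ_min_succ, List.range_succ_eq_map]
      simp only [List.flatMap_cons, List.flatMap_map, List.drop_succ_cons, List.getD_cons_zero,
        List.getD_cons_succ]
      rw [ih ys]
      simp

lemma pvB_eq_go (l1 l2 : List Int) : mergeListHelper_alt l1 l2 = pvGo l1 l2 := by
  unfold mergeListHelper_alt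
  rw [pvTailLoop_eq l1 l2.length l1.length [] (Nat.le_refl _), pvPairLoop_eq, pvGo_flat]
  simp [List.reverse_append, pvRev2_reverse, List.take_length]

-- ===== VERDICT (by name: the statement is the Claim_ definition above) =====
theorem mergeListHelper_spec : Claim_equal_mergeListHelper := by
  intro l1 l2 _
  unfold Spec_mergeListHelper
  rw [pvA_eq_go, pvB_eq_go]
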